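-- pv_equiv track=rewrite | github.com/arjunjyothieswarb/Leo_explore | planner/scripts/global_planner.py | thicken_walls
-- ===== SOURCE A (Python) =====
-- def thicken_walls(grid):
--     rows = len(grid)
--     if rows == 0:
--         return grid
--     cols = len(grid[0])
--
--     # 创建一个复制的grid，以避免在迭代时修改原始grid
--     new_grid = [row[:] for row in grid]
--
--     # 要修改的区域范围
--     range_to_modify = range(-2, 3)  # 从-2到2
--
--     # 查找并扩展墙壁
--     for r in range(rows):
--         for c in range(cols):
--             if grid[r][c] == 100:
--                 # 修改以当前单元格为中心的5x5区域
--                 for i in range_to_modify: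
--                     for j in range_to_modify:
--                         new_r, new_c = r + i, c + j
--                         if 0 <= new_r < rows and 0 <= new_c < cols:
--                             new_grid[new_r][new_c] = 100
--
--     return new_grid
-- ===== SOURCE B (Python) =====
-- def thicken_walls(grid):
--     rows = len(grid)
--     if rows == 0:
--         return grid
--     cols = len(grid[0])
--     new_grid = [row[:] for row in grid]
--     # a cell becomes a wall iff some wall lies in its (clamped) 5x5 neighbourhood
--     for r in range(rows):
--         for c in range(cols):
--             if any(grid[r2][c2] == 100
--                    for r2 in range(max(r - 2, 0), min(r + 3, rows))
--                    for c2 in range(max(c - 2, 0), min(c + 3, cols))):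
--                 new_grid[r][c] = 100
--     return new_grid
-- ===== Notes on version B (the rewrite author's own statement) =====
-- stated objective: alternative
-- what changed: Replaces A's per-wall 5x5 scatter writes by a per-cell gather: each cell checks its clamped 5x5 neighbourhood of the original grid for a wall.
import Mathlib
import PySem

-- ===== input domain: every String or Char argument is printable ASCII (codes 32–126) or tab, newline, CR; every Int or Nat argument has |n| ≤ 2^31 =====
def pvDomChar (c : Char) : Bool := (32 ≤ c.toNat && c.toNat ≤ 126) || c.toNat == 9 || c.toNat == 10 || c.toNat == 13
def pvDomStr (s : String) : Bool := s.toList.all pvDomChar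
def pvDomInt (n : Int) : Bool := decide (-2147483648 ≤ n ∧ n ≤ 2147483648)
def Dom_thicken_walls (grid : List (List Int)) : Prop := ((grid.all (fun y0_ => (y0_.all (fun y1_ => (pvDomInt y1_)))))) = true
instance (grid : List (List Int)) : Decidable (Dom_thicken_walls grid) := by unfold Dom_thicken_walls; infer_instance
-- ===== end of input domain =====

-- B replaces A's per-wall 5x5 scatter writes by a per-cell gather over the clamped 5x5 neighbourhood of the original grid (alternative decomposition, same asymptotic cost).

-- ===== PORT A =====
-- Python: new_grid[new_r][new_c] = 100, guarded by 0 <= new_r < rows and 0 <= new_c < cols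
def pvSet100 (rows cols : Int) (g : List (List Int)) (nr nc : Int) : List (List Int) :=
  if 0 ≤ nr ∧ nr < rows ∧ 0 ≤ nc ∧ nc < cols then
    g.modify nr.toNat (fun row => row.set nc.toNat 100)
  else g

def thicken_walls (grid : List (List Int)) : List (List Int) :=
  let rows : Int := grid.length
  if rows = 0 then grid
  else
    let cols : Int := (grid.headD []).length
    -- grid[r][c]: in range for every scanned (r, c) under Pre_, so the getD default is never consulted
    (PySem.List.pyRange 0 rows 1).foldl (fun ng r =>
      (PySem.List.pyRange 0 cols 1).foldl (fun ng c =>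
        if PySem.List.pyGetD (PySem.List.pyGetD grid r []) c 0 = 100 then
          (PySem.List.pyRange (-2) 3 1).foldl (fun ng i =>
            (PySem.List.pyRange (-2) 3 1).foldl (fun ng j =>
              pvSet100 rows cols ng (r + i) (c + j)) ng) ng
        else ng) ng) grid

-- ===== PORT B =====
-- the `any(...)` window test of Source B
def pvWin (grid : List (List Int)) (rows cols r c : Int) : Bool :=
  (PySem.List.pyRange (max (r - 2) 0) (min (r + 3) rows) 1).any (fun r2 =>
    (PySem.List.pyRange (max (c - 2) 0) (min (c + 3) cols) 1).any (fun c2 =>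
      PySem.List.pyGetD (PySem.List.pyGetD grid r2 []) c2 0 == 100))

-- Python: new_grid[r][c] = 100 (r, c always in range when executed)
def pvWrite100 (g : List (List Int)) (r c : Int) : List (List Int) :=
  g.modify r.toNat (fun row => row.set c.toNat 100)

def thicken_walls_alt (grid : List (List Int)) : List (List Int) :=
  let rows : Int := grid.length
  if rows = 0 then grid
  else
    let cols : Int := (grid.headD []).length
    let new_grid := grid.map (fun row => PySem.List.slice row none none)
    (PySem.List.pyRange 0 rows 1).foldl (fun ng r =>
      (PySem.List.pyRange 0 cols 1).foldl (fun ng c =>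
        if pvWin grid rows cols r c then pvWrite100 ng r c else ng) ng) new_grid

-- ===== PRECONDITION & SPEC =====
-- Pre_ excludes grids in which some row is shorter than the first row: there A raises IndexError
-- when its scan reads grid[r][c] for c in range(len(grid[0])).
def Pre_thicken_walls (grid : List (List Int)) : Prop :=
  ∀ row ∈ grid, (grid.headD []).length ≤ row.length

instance (grid : List (List Int)) : Decidable (Pre_thicken_walls grid) := by
  unfold Pre_thicken_walls; infer_instance

def pvWitness_thicken_walls : List (List Int) := [[0, 100, 0], [0, 0, 0], [7, 0, 0]]

def Spec_thicken_walls (grid : List (List Int)) (out : List (List Int)) : Prop := out = thicken_walls_alt grid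
instance (grid : List (List Int)) (out : List (List Int)) : Decidable (Spec_thicken_walls grid out) := by unfold Spec_thicken_walls; infer_instance

-- ===== CLAIM (what is proved, stated in full; the proofs are below) =====
def Claim_equal_thicken_walls : Prop := ∀ (grid : List (List Int)), Dom_thicken_walls grid → Pre_thicken_walls grid → Spec_thicken_walls grid (thicken_walls grid)

-- ===== LEMMAS AND PROOFS =====

-- cell access used by the proofs
def pvAt (g : List (List Int)) (r c : Nat) : Int := (g.getD r []).getD c 0

-- shape invariant: same number of rows as grid, every row of its original length
def pvShape (grid g : List (List Int)) : Prop :=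
  g.length = grid.length ∧ ∀ j < grid.length, (g.getD j []).length = (grid.getD j []).length

-- every row is at least as long as the first (what Pre_ gives, in getD form)
def pvWide (grid : List (List Int)) : Prop :=
  ∀ j < grid.length, (grid.headD []).length ≤ (grid.getD j []).length

theorem pvWide_of_pre {grid : List (List Int)} (hpre : Pre_thicken_walls grid) : pvWide grid := by
  intro j hj
  rw [List.getD_eq_getElem _ [] hj]
  exact hpre _ (List.getElem_mem _)

-- "some wall of grid lies in the 5x5 window centred at (r, c)"
def pvNear (grid : List (List Int)) (R C r c : Nat) : Bool :=
  (List.range R).any fun r2 => (List.range C).any fun c2 =>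
    decide ((r : Int) - 2 ≤ r2) && decide ((r2 : Int) ≤ (r : Int) + 2) &&
    decide ((c : Int) - 2 ≤ c2) && decide ((c2 : Int) ≤ (c : Int) + 2) &&
    (pvAt grid r2 c2 == 100)

theorem pvNear_iff (grid : List (List Int)) (R C r c : Nat) :
    pvNear grid R C r c = true ↔
      ∃ r2 < R, ∃ c2 < C,
        (r : Int) - 2 ≤ r2 ∧ (r2 : Int) ≤ (r : Int) + 2 ∧
        (c : Int) - 2 ≤ c2 ∧ (c2 : Int) ≤ (c : Int) + 2 ∧
        pvAt grid r2 c2 = 100 := by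
  simp [pvNear, List.any_eq_true, List.mem_range, and_assoc]

-- the value A reads at grid[r2][c2]
def pvRead (grid : List (List Int)) (r2 c2 : Int) : Int :=
  PySem.List.pyGetD (PySem.List.pyGetD grid r2 []) c2 0

-- the body of A's (r, c) scan, with the 5x5 stamp flattened to a fold over offset pairs
def pvStep (grid : List (List Int)) (R C : Int) (ng : List (List Int)) (p : Int × Int) : List (List Int) :=
  if pvRead grid p.1 p.2 = 100 then
    ((PySem.List.pyRange (-2) 3 1).flatMap (fun i => (PySem.List.pyRange (-2) 3 1).map (fun j => (i, j)))).foldl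
      (fun ng q => pvSet100 R C ng (p.1 + q.1) (p.2 + q.2)) ng
  else ng

-- the body of B's (r, c) scan
def pvStepB (grid : List (List Int)) (R C : Int) (ng : List (List Int)) (p : Int × Int) : List (List Int) :=
  if pvWin grid R C p.1 p.2 then pvWrite100 ng p.1 p.2 else ng

-- a nested fold over two index lists is a fold over their pair list
theorem pvFoldlFoldl {α β γ : Type} (xs : List α) (ys : List β) (f : γ → α × β → γ) (init : γ) :
    xs.foldl (fun s x => ys.foldl (fun s y => f s (x, y)) s) init
      = (xs.flatMap (fun x => ys.map (fun y => (x, y)))).foldl f init := by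
  induction xs generalizing init with
  | nil => rfl
  | cons x xs ih =>
      simp only [List.foldl_cons, List.flatMap_cons, List.foldl_append, List.foldl_map]
      exact ih _

theorem pvA_eq_scan (grid : List (List Int)) (h0 : grid.length ≠ 0) :
    thicken_walls grid =
      ((PySem.List.pyRange 0 (grid.length : Int) 1).flatMap
        (fun r => (PySem.List.pyRange 0 ((grid.headD []).length : Int) 1).map (fun c => (r, c)))).foldl
        (pvStep grid (grid.length : Int) ((grid.headD []).length : Int)) grid := by
  have hA := pvFoldlFoldl (PySem.List.pyRange 0 (grid.length : Int) 1)
    (PySem.List.pyRange 0 ((grid.headD []).length : Int) 1)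
    (fun ng (p : Int × Int) =>
      if pvRead grid p.1 p.2 = 100 then
        (PySem.List.pyRange (-2) 3 1).foldl (fun ng i =>
          (PySem.List.pyRange (-2) 3 1).foldl (fun ng j =>
            pvSet100 (grid.length : Int) ((grid.headD []).length : Int) ng (p.1 + i) (p.2 + j)) ng) ng
      else ng) grid
  have hstep : (fun ng (p : Int × Int) =>
      if pvRead grid p.1 p.2 = 100 then
        (PySem.List.pyRange (-2) 3 1).foldl (fun ng i =>
          (PySem.List.pyRange (-2) 3 1).foldl (fun ng j =>
            pvSet100 (grid.length : Int) ((grid.headD []).length : Int) ng (p.1 + i) (p.2 + j)) ng) ng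
      else ng) = pvStep grid (grid.length : Int) ((grid.headD []).length : Int) := by
    funext ng p
    unfold pvStep
    split
    · exact pvFoldlFoldl (PySem.List.pyRange (-2) 3 1) (PySem.List.pyRange (-2) 3 1)
        (fun ng q => pvSet100 (grid.length : Int) ((grid.headD []).length : Int) ng (p.1 + q.1) (p.2 + q.2)) ng
    · rfl
  rw [hstep] at hA
  unfold thicken_walls
  rw [if_neg (by exact_mod_cast h0)]
  exact hA

theorem pvB_eq_scan (grid : List (List Int)) (h0 : grid.length ≠ 0) :
    thicken_walls_alt grid =
      ((PySem.List.pyRange 0 (grid.length : Int) 1).flatMap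
        (fun r => (PySem.List.pyRange 0 ((grid.headD []).length : Int) 1).map (fun c => (r, c)))).foldl
        (pvStepB grid (grid.length : Int) ((grid.headD []).length : Int)) grid := by
  have hB := pvFoldlFoldl (PySem.List.pyRange 0 (grid.length : Int) 1)
    (PySem.List.pyRange 0 ((grid.headD []).length : Int) 1)
    (pvStepB grid (grid.length : Int) ((grid.headD []).length : Int)) grid
  unfold thicken_walls_alt
  rw [if_neg (by exact_mod_cast h0)]
  simp only [PySem.List.slice_none_none, List.map_id']
  exact hB

theorem pvGetD_modify {α : Type} (d : α) (f : α → α) (i r : Nat) (l : List α) (hr : r < l.length) :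
    (l.modify i f).getD r d = if i = r then f (l.getD r d) else l.getD r d := by
  rw [List.getD_eq_getElem?_getD, List.getElem?_modify, List.getElem?_eq_getElem hr]
  by_cases h : i = r <;> simp [h, List.getD_eq_getElem?_getD, List.getElem?_eq_getElem hr]

theorem pvGetD_set {α : Type} (d a : α) (i c : Nat) (l : List α) (hc : c < l.length) :
    (l.set i a).getD c d = if i = c then a else l.getD c d := by
  rw [List.getD_eq_getElem?_getD, List.getElem?_set]
  by_cases h : i = c <;> simp [h, hc, List.getD_eq_getElem?_getD]

theorem pvGetD_set_ne {α : Type} (d a : α) (i c : Nat) (l : List α) (h : i ≠ c) :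
    (l.set i a).getD c d = l.getD c d := by
  rw [List.getD_eq_getElem?_getD, List.getElem?_set, if_neg h, List.getD_eq_getElem?_getD]

theorem pvShape_set100 (grid : List (List Int)) {g : List (List Int)} (h : pvShape grid g)
    (rows cols nr nc : Int) : pvShape grid (pvSet100 rows cols g nr nc) := by
  unfold pvSet100
  split
  · refine ⟨by rw [List.length_modify]; exact h.1, ?_⟩
    intro j hj
    rw [pvGetD_modify _ _ _ _ _ (by rw [h.1]; exact hj)]
    split
    · rw [List.length_set]
      exact h.2 j hj
    · exact h.2 j hj
  · exact h

theorem pvAt_set100 (grid : List (List Int)) (hw : pvWide grid) {g : List (List Int)}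
    (h : pvShape grid g) {r c : Nat} (hr : r < grid.length) (hc : c < (grid.headD []).length)
    (nr nc : Int) :
    pvAt (pvSet100 (grid.length : Int) ((grid.headD []).length : Int) g nr nc) r c =
      if nr = (r : Int) ∧ nc = (c : Int) then 100 else pvAt g r c := by
  have hrlen : r < g.length := by rw [h.1]; exact hr
  have hglen : (grid.headD []).length ≤ (g.getD r []).length := by
    rw [h.2 r hr]; exact hw r hr
  unfold pvSet100 pvAt
  by_cases hg : 0 ≤ nr ∧ nr < (grid.length : Int) ∧ 0 ≤ nc ∧ nc < ((grid.headD []).length : Int)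
  · rw [if_pos hg, pvGetD_modify _ _ _ _ _ hrlen]
    by_cases hnr : nr.toNat = r
    · rw [if_pos hnr, pvGetD_set _ _ _ _ _ (by omega)]
      by_cases hnc : nc.toNat = c
      · rw [if_pos hnc, if_pos ⟨by omega, by omega⟩]
      · rw [if_neg hnc, if_neg (by rintro ⟨h1, h2⟩; exact hnc (by omega))]
    · rw [if_neg hnr, if_neg (by rintro ⟨h1, h2⟩; exact hnr (by omega))]
  · rw [if_neg hg, if_neg (by rintro ⟨h1, h2⟩; exact hg ⟨by omega, by omega, by omega, by omega⟩)]

theorem pvAt_set100_tail (grid : List (List Int)) {g : List (List Int)} (h : pvShape grid g)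
    {r c : Nat} (hr : r < grid.length) (hc : (grid.headD []).length ≤ c) (rows nr nc : Int) :
    pvAt (pvSet100 rows ((grid.headD []).length : Int) g nr nc) r c = pvAt g r c := by
  unfold pvSet100 pvAt
  split
  · rename_i hg
    rw [pvGetD_modify _ _ _ _ _ (by rw [h.1]; exact hr)]
    split
    · rw [pvGetD_set_ne _ _ _ _ _ (by omega)]
    · rfl
  · rfl

theorem pvShape_offFold (grid : List (List Int)) (rows cols a b : Int) :
    ∀ (os : List (Int × Int)) (g : List (List Int)), pvShape grid g →
      pvShape grid (os.foldl (fun ng q => pvSet100 rows cols ng (a + q.1) (b + q.2)) g) := by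
  intro os
  induction os with
  | nil => intro g h; exact h
  | cons q os ih => intro g h; exact ih _ (pvShape_set100 grid h _ _ _ _)

theorem pvAt_offFold (grid : List (List Int)) (hw : pvWide grid)
    {r c : Nat} (hr : r < grid.length) (hc : c < (grid.headD []).length) (a b : Int) :
    ∀ (os : List (Int × Int)) (g : List (List Int)), pvShape grid g →
      pvAt (os.foldl (fun ng q =>
          pvSet100 (grid.length : Int) ((grid.headD []).length : Int) ng (a + q.1) (b + q.2)) g) r c =
        if ∃ q ∈ os, a + q.1 = (r : Int) ∧ b + q.2 = (c : Int) then 100 else pvAt g r c := by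
  intro os
  induction os with
  | nil => intro g h; simp
  | cons q os ih =>
      intro g h
      rw [List.foldl_cons, ih _ (pvShape_set100 grid h _ _ _ _), pvAt_set100 grid hw h hr hc]
      by_cases h1 : ∃ q' ∈ os, a + q'.1 = (r : Int) ∧ b + q'.2 = (c : Int)
      · obtain ⟨q', hmem, hv⟩ := h1
        rw [if_pos ⟨q', hmem, hv⟩, if_pos ⟨q', List.mem_cons_of_mem _ hmem, hv⟩]
      · rw [if_neg h1]
        by_cases h2 : a + q.1 = (r : Int) ∧ b + q.2 = (c : Int)
        · rw [if_pos h2, if_pos ⟨q, List.mem_cons_self, h2⟩]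
        · rw [if_neg h2, if_neg ?_]
          rintro ⟨q', hq', hv⟩
          rcases List.mem_cons.mp hq' with rfl | hmem
          · exact h2 hv
          · exact h1 ⟨q', hmem, hv⟩

theorem pvAt_offFold_tail (grid : List (List Int))
    {r c : Nat} (hr : r < grid.length) (hc : (grid.headD []).length ≤ c) (rows a b : Int) :
    ∀ (os : List (Int × Int)) (g : List (List Int)), pvShape grid g →
      pvAt (os.foldl (fun ng q =>
          pvSet100 rows ((grid.headD []).length : Int) ng (a + q.1) (b + q.2)) g) r c = pvAt g r c := by
  intro os
  induction os with
  | nil => intro g h; rfl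
  | cons q os ih =>
      intro g h
      rw [List.foldl_cons, ih _ (pvShape_set100 grid h _ _ _ _), pvAt_set100_tail grid h hr hc]

theorem pvShape_step (grid : List (List Int)) {g : List (List Int)}
    (h : pvShape grid g) (p : Int × Int) :
    pvShape grid (pvStep grid (grid.length : Int) ((grid.headD []).length : Int) g p) := by
  unfold pvStep
  split
  · exact pvShape_offFold grid _ _ _ _ _ _ h
  · exact h

theorem pvAt_step (grid : List (List Int)) (hw : pvWide grid) {g : List (List Int)}
    (h : pvShape grid g) {r c : Nat} (hr : r < grid.length) (hc : c < (grid.headD []).length)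
    (p : Int × Int) :
    pvAt (pvStep grid (grid.length : Int) ((grid.headD []).length : Int) g p) r c =
      if pvRead grid p.1 p.2 = 100 ∧ p.1 - 2 ≤ (r : Int) ∧ (r : Int) ≤ p.1 + 2 ∧
          p.2 - 2 ≤ (c : Int) ∧ (c : Int) ≤ p.2 + 2 then 100 else pvAt g r c := by
  unfold pvStep
  by_cases hread : pvRead grid p.1 p.2 = 100
  · rw [if_pos hread, pvAt_offFold grid hw hr hc _ _ _ _ h]
    have hiff : (∃ q ∈ (PySem.List.pyRange (-2) 3 1).flatMap
          (fun i => (PySem.List.pyRange (-2) 3 1).map (fun j => (i, j))),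
        p.1 + q.1 = (r : Int) ∧ p.2 + q.2 = (c : Int)) ↔
        (p.1 - 2 ≤ (r : Int) ∧ (r : Int) ≤ p.1 + 2 ∧ p.2 - 2 ≤ (c : Int) ∧ (c : Int) ≤ p.2 + 2) := by
      constructor
      · rintro ⟨q, hq, h1, h2⟩
        simp only [List.mem_flatMap, List.mem_map, PySem.List.mem_pyRange_one] at hq
        obtain ⟨i, hi, j, hj, rfl⟩ := hq
        simp only at h1 h2
        omega
      · rintro ⟨h1, h2, h3, h4⟩
        refine ⟨((r : Int) - p.1, (c : Int) - p.2), ?_, by omega, by omega⟩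
        simp only [List.mem_flatMap, List.mem_map, PySem.List.mem_pyRange_one]
        exact ⟨(r : Int) - p.1, by omega, (c : Int) - p.2, by omega, rfl⟩
    rw [if_congr hiff rfl rfl, if_congr (and_iff_right hread) rfl rfl]
  · rw [if_neg hread, if_neg (by tauto)]

theorem pvAt_step_tail (grid : List (List Int)) {g : List (List Int)}
    (h : pvShape grid g) {r c : Nat} (hr : r < grid.length) (hc : (grid.headD []).length ≤ c)
    (p : Int × Int) :
    pvAt (pvStep grid (grid.length : Int) ((grid.headD []).length : Int) g p) r c = pvAt g r c := by
  unfold pvStep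
  split
  · exact pvAt_offFold_tail grid hr hc _ _ _ _ _ h
  · rfl

theorem pvShape_scan (grid : List (List Int)) :
    ∀ (ps : List (Int × Int)) (g : List (List Int)), pvShape grid g →
      pvShape grid (ps.foldl (pvStep grid (grid.length : Int) ((grid.headD []).length : Int)) g) := by
  intro ps
  induction ps with
  | nil => intro g h; exact h
  | cons p ps ih => intro g h; exact ih _ (pvShape_step grid h p)

theorem pvAt_scan (grid : List (List Int)) (hw : pvWide grid)
    {r c : Nat} (hr : r < grid.length) (hc : c < (grid.headD []).length) :
    ∀ (ps : List (Int × Int)) (g : List (List Int)), pvShape grid g →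
      pvAt (ps.foldl (pvStep grid (grid.length : Int) ((grid.headD []).length : Int)) g) r c =
        if ∃ p ∈ ps, pvRead grid p.1 p.2 = 100 ∧ p.1 - 2 ≤ (r : Int) ∧ (r : Int) ≤ p.1 + 2 ∧
            p.2 - 2 ≤ (c : Int) ∧ (c : Int) ≤ p.2 + 2 then 100 else pvAt g r c := by
  intro ps
  induction ps with
  | nil => intro g h; simp
  | cons p ps ih =>
      intro g h
      rw [List.foldl_cons, ih _ (pvShape_step grid h p), pvAt_step grid hw h hr hc]
      by_cases h1 : ∃ p' ∈ ps, pvRead grid p'.1 p'.2 = 100 ∧ p'.1 - 2 ≤ (r : Int) ∧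
          (r : Int) ≤ p'.1 + 2 ∧ p'.2 - 2 ≤ (c : Int) ∧ (c : Int) ≤ p'.2 + 2
      · rw [if_pos h1, if_pos ?_]
        obtain ⟨p', hmem, hv⟩ := h1
        exact ⟨p', List.mem_cons_of_mem _ hmem, hv⟩
      · rw [if_neg h1]
        by_cases h2 : pvRead grid p.1 p.2 = 100 ∧ p.1 - 2 ≤ (r : Int) ∧ (r : Int) ≤ p.1 + 2 ∧
            p.2 - 2 ≤ (c : Int) ∧ (c : Int) ≤ p.2 + 2
        · rw [if_pos h2, if_pos ⟨p, List.mem_cons_self, h2⟩]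
        · rw [if_neg h2, if_neg ?_]
          rintro ⟨p', hp', hv⟩
          rcases List.mem_cons.mp hp' with rfl | hmem
          · exact h2 hv
          · exact h1 ⟨p', hmem, hv⟩

theorem pvAt_scan_tail (grid : List (List Int))
    {r c : Nat} (hr : r < grid.length) (hc : (grid.headD []).length ≤ c) :
    ∀ (ps : List (Int × Int)) (g : List (List Int)), pvShape grid g →
      pvAt (ps.foldl (pvStep grid (grid.length : Int) ((grid.headD []).length : Int)) g) r c =
        pvAt g r c := by
  intro ps
  induction ps with
  | nil => intro g h; rfl
  | cons p ps ih =>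
      intro g h
      rw [List.foldl_cons, ih _ (pvShape_step grid h p), pvAt_step_tail grid h hr hc]

theorem pvShape_refl (grid : List (List Int)) : pvShape grid grid := ⟨rfl, fun _ _ => rfl⟩

theorem pvA_shape (grid : List (List Int)) (_hpre : Pre_thicken_walls grid) :
    pvShape grid (thicken_walls grid) := by
  by_cases h0 : grid.length = 0
  · unfold thicken_walls
    rw [if_pos (by exact_mod_cast h0)]
    exact pvShape_refl grid
  · rw [pvA_eq_scan grid h0]
    exact pvShape_scan grid _ grid (pvShape_refl grid)

theorem pvA_char (grid : List (List Int)) (hpre : Pre_thicken_walls grid)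
    {r c : Nat} (hr : r < grid.length) (hc : c < (grid.headD []).length) :
    pvAt (thicken_walls grid) r c =
      if pvNear grid grid.length (grid.headD []).length r c = true then 100 else pvAt grid r c := by
  have h0 : grid.length ≠ 0 := by omega
  rw [pvA_eq_scan grid h0, pvAt_scan grid (pvWide_of_pre hpre) hr hc _ grid (pvShape_refl grid)]
  have hiff : (∃ p ∈ (PySem.List.pyRange 0 (grid.length : Int) 1).flatMap
        (fun r2 => (PySem.List.pyRange 0 ((grid.headD []).length : Int) 1).map (fun c2 => (r2, c2))),
      pvRead grid p.1 p.2 = 100 ∧ p.1 - 2 ≤ (r : Int) ∧ (r : Int) ≤ p.1 + 2 ∧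
        p.2 - 2 ≤ (c : Int) ∧ (c : Int) ≤ p.2 + 2) ↔
      pvNear grid grid.length (grid.headD []).length r c = true := by
    rw [pvNear_iff]
    constructor
    · rintro ⟨p, hp, hread, h1, h2, h3, h4⟩
      simp only [List.mem_flatMap, List.mem_map, PySem.List.mem_pyRange_one] at hp
      obtain ⟨r2, hr2, c2, hc2, rfl⟩ := hp
      refine ⟨r2.toNat, by omega, c2.toNat, by omega, by omega, by omega, by omega, by omega, ?_⟩
      rw [← hread]
      unfold pvRead pvAt
      rw [PySem.List.pyGetD_of_nonneg _ _ hr2.1, PySem.List.pyGetD_of_nonneg _ _ hc2.1]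
    · rintro ⟨r2, hr2, c2, hc2, h1, h2, h3, h4, hwall⟩
      refine ⟨((r2 : Int), (c2 : Int)), ?_, ?_, by push_cast; omega, by push_cast; omega,
        by push_cast; omega, by push_cast; omega⟩
      · simp only [List.mem_flatMap, List.mem_map, PySem.List.mem_pyRange_one]
        exact ⟨(r2 : Int), ⟨by omega, by exact_mod_cast hr2⟩, (c2 : Int), ⟨by omega, by exact_mod_cast hc2⟩, rfl⟩
      · unfold pvRead
        rw [PySem.List.pyGetD_of_nonneg _ _ (by omega : (0:Int) ≤ (r2 : Int)),
          PySem.List.pyGetD_of_nonneg _ _ (by omega : (0:Int) ≤ (c2 : Int))]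
        simpa using hwall
  rw [if_congr hiff rfl rfl]

theorem pvA_tail (grid : List (List Int)) (_hpre : Pre_thicken_walls grid)
    {r c : Nat} (hr : r < grid.length) (hc : (grid.headD []).length ≤ c) :
    pvAt (thicken_walls grid) r c = pvAt grid r c := by
  have h0 : grid.length ≠ 0 := by omega
  rw [pvA_eq_scan grid h0, pvAt_scan_tail grid hr hc _ grid (pvShape_refl grid)]

-- ===== B-side lemmas =====

theorem pvShape_write (grid : List (List Int)) {g : List (List Int)} (h : pvShape grid g)
    (nr nc : Int) : pvShape grid (pvWrite100 g nr nc) := by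
  unfold pvWrite100
  refine ⟨by rw [List.length_modify]; exact h.1, ?_⟩
  intro j hj
  by_cases hjl : j < g.length
  · rw [pvGetD_modify _ _ _ _ _ hjl]
    split
    · rw [List.length_set]
      exact h.2 j hj
    · exact h.2 j hj
  · exact absurd (h.1 ▸ hj) hjl

theorem pvAt_write (grid : List (List Int)) (hw : pvWide grid) {g : List (List Int)}
    (h : pvShape grid g) {r c : Nat} (hr : r < grid.length) (hc : c < (grid.headD []).length)
    {nr nc : Int} (hnr : 0 ≤ nr) (hnc : 0 ≤ nc) :
    pvAt (pvWrite100 g nr nc) r c =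
      if nr = (r : Int) ∧ nc = (c : Int) then 100 else pvAt g r c := by
  have hrlen : r < g.length := by rw [h.1]; exact hr
  have hglen : (grid.headD []).length ≤ (g.getD r []).length := by
    rw [h.2 r hr]; exact hw r hr
  unfold pvWrite100 pvAt
  rw [pvGetD_modify _ _ _ _ _ hrlen]
  by_cases hnr' : nr.toNat = r
  · rw [if_pos hnr', pvGetD_set _ _ _ _ _ (by omega)]
    by_cases hnc' : nc.toNat = c
    · rw [if_pos hnc', if_pos ⟨by omega, by omega⟩]
    · rw [if_neg hnc', if_neg (by rintro ⟨h1, h2⟩; exact hnc' (by omega))]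
  · rw [if_neg hnr', if_neg (by rintro ⟨h1, h2⟩; exact hnr' (by omega))]

theorem pvAt_write_tail (grid : List (List Int)) {g : List (List Int)} (h : pvShape grid g)
    {r c : Nat} (hr : r < grid.length) (hc : (grid.headD []).length ≤ c)
    {nr nc : Int} (hnc0 : 0 ≤ nc) (hnc : nc < ((grid.headD []).length : Int)) :
    pvAt (pvWrite100 g nr nc) r c = pvAt g r c := by
  unfold pvWrite100 pvAt
  by_cases hrl : r < g.length
  · rw [pvGetD_modify _ _ _ _ _ hrl]
    split
    · rw [pvGetD_set_ne _ _ _ _ _ (by omega)]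
    · rfl
  · exact absurd (h.1 ▸ hr) hrl

theorem pvShape_stepB (grid : List (List Int)) (R C : Int) {g : List (List Int)}
    (h : pvShape grid g) (p : Int × Int) : pvShape grid (pvStepB grid R C g p) := by
  unfold pvStepB
  split
  · exact pvShape_write grid h _ _
  · exact h

theorem pvAt_scanB (grid : List (List Int)) (hw : pvWide grid)
    {r c : Nat} (hr : r < grid.length) (hc : c < (grid.headD []).length) :
    ∀ (ps : List (Int × Int)), (∀ p ∈ ps, 0 ≤ p.1 ∧ 0 ≤ p.2) →
      ∀ (g : List (List Int)), pvShape grid g →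
      pvAt (ps.foldl (pvStepB grid (grid.length : Int) ((grid.headD []).length : Int)) g) r c =
        if ∃ p ∈ ps, p.1 = (r : Int) ∧ p.2 = (c : Int) ∧
            pvWin grid (grid.length : Int) ((grid.headD []).length : Int) p.1 p.2 = true
        then 100 else pvAt g r c := by
  intro ps
  induction ps with
  | nil => intro _ g h; simp
  | cons p ps ih =>
      intro hbd g h
      have hb := hbd p List.mem_cons_self
      rw [List.foldl_cons, ih (fun q hq => hbd q (List.mem_cons_of_mem _ hq)) _
        (pvShape_stepB grid _ _ h p)]
      by_cases h1 : ∃ p' ∈ ps, p'.1 = (r : Int) ∧ p'.2 = (c : Int) ∧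
          pvWin grid (grid.length : Int) ((grid.headD []).length : Int) p'.1 p'.2 = true
      · obtain ⟨p', hmem, hv⟩ := h1
        rw [if_pos ⟨p', hmem, hv⟩, if_pos ⟨p', List.mem_cons_of_mem _ hmem, hv⟩]
      · rw [if_neg h1]
        unfold pvStepB
        by_cases hwin : pvWin grid (grid.length : Int) ((grid.headD []).length : Int) p.1 p.2 = true
        · rw [if_pos hwin, pvAt_write grid hw h hr hc hb.1 hb.2]
          by_cases h2 : p.1 = (r : Int) ∧ p.2 = (c : Int)
          · rw [if_pos h2, if_pos ⟨p, List.mem_cons_self, h2.1, h2.2, hwin⟩]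
          · rw [if_neg h2, if_neg ?_]
            rintro ⟨p', hp', hv1, hv2, hv3⟩
            rcases List.mem_cons.mp hp' with rfl | hmem
            · exact h2 ⟨hv1, hv2⟩
            · exact h1 ⟨p', hmem, hv1, hv2, hv3⟩
        · rw [if_neg hwin, if_neg ?_]
          rintro ⟨p', hp', hv1, hv2, hv3⟩
          rcases List.mem_cons.mp hp' with rfl | hmem
          · exact hwin hv3
          · exact h1 ⟨p', hmem, hv1, hv2, hv3⟩

theorem pvAt_scanB_tail (grid : List (List Int))
    {r c : Nat} (hr : r < grid.length) (hc : (grid.headD []).length ≤ c) :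
    ∀ (ps : List (Int × Int)), (∀ p ∈ ps, 0 ≤ p.2 ∧ p.2 < ((grid.headD []).length : Int)) →
      ∀ (g : List (List Int)), pvShape grid g →
      pvAt (ps.foldl (pvStepB grid (grid.length : Int) ((grid.headD []).length : Int)) g) r c =
        pvAt g r c := by
  intro ps
  induction ps with
  | nil => intro _ g h; rfl
  | cons p ps ih =>
      intro hbd g h
      rw [List.foldl_cons, ih (fun q hq => hbd q (List.mem_cons_of_mem _ hq)) _
        (pvShape_stepB grid _ _ h p)]
      unfold pvStepB
      split
      · exact pvAt_write_tail grid h hr hc (hbd p List.mem_cons_self).1 (hbd p List.mem_cons_self).2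
      · rfl

theorem pvShape_scanB (grid : List (List Int)) (R C : Int) :
    ∀ (ps : List (Int × Int)) (g : List (List Int)), pvShape grid g →
      pvShape grid (ps.foldl (pvStepB grid R C) g) := by
  intro ps
  induction ps with
  | nil => intro g h; exact h
  | cons p ps ih => intro g h; exact ih _ (pvShape_stepB grid _ _ h p)

-- the clamped-window any-test equals pvNear
theorem pvWin_iff_near (grid : List (List Int)) {r c : Nat}
    (_hr : r < grid.length) (_hc : c < (grid.headD []).length) :
    pvWin grid (grid.length : Int) ((grid.headD []).length : Int) (r : Int) (c : Int) = true ↔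
      pvNear grid grid.length (grid.headD []).length r c = true := by
  rw [pvNear_iff]
  unfold pvWin
  simp only [List.any_eq_true, PySem.List.mem_pyRange_one, beq_iff_eq]
  constructor
  · rintro ⟨r2, hr2, c2, hc2, hwall⟩
    have hnr2 : (0 : Int) ≤ r2 := le_trans (le_max_right _ _) hr2.1
    have hnc2 : (0 : Int) ≤ c2 := le_trans (le_max_right _ _) hc2.1
    have ha1 : (r : Int) - 2 ≤ r2 := le_trans (le_max_left _ _) hr2.1
    have ha2 : r2 < (r : Int) + 3 := lt_of_lt_of_le hr2.2 (min_le_left _ _)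
    have ha3 : r2 < (grid.length : Int) := lt_of_lt_of_le hr2.2 (min_le_right _ _)
    have hb1 : (c : Int) - 2 ≤ c2 := le_trans (le_max_left _ _) hc2.1
    have hb2 : c2 < (c : Int) + 3 := lt_of_lt_of_le hc2.2 (min_le_left _ _)
    have hb3 : c2 < ((grid.headD []).length : Int) := lt_of_lt_of_le hc2.2 (min_le_right _ _)
    refine ⟨r2.toNat, by omega, c2.toNat, by omega, by omega, by omega, by omega, by omega, ?_⟩
    rw [← hwall]
    unfold pvAt
    rw [PySem.List.pyGetD_of_nonneg _ _ hnr2, PySem.List.pyGetD_of_nonneg _ _ hnc2]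
  · rintro ⟨r2, hr2, c2, hc2, h1, h2, h3, h4, hwall⟩
    refine ⟨(r2 : Int), ⟨max_le (by omega) (by omega), lt_min (by omega) (by exact_mod_cast hr2)⟩,
      (c2 : Int), ⟨max_le (by omega) (by omega), lt_min (by omega) (by exact_mod_cast hc2)⟩, ?_⟩
    rw [PySem.List.pyGetD_of_nonneg _ _ (by omega : (0:Int) ≤ (r2 : Int)),
      PySem.List.pyGetD_of_nonneg _ _ (by omega : (0:Int) ≤ (c2 : Int))]
    simpa using hwall

theorem pvB_shape (grid : List (List Int)) (_hpre : Pre_thicken_walls grid) :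
    pvShape grid (thicken_walls_alt grid) := by
  by_cases h0 : grid.length = 0
  · unfold thicken_walls_alt
    rw [if_pos (by exact_mod_cast h0)]
    exact pvShape_refl grid
  · rw [pvB_eq_scan grid h0]
    exact pvShape_scanB grid _ _ _ grid (pvShape_refl grid)

theorem pvB_char (grid : List (List Int)) (hpre : Pre_thicken_walls grid)
    {r c : Nat} (hr : r < grid.length) (hc : c < (grid.headD []).length) :
    pvAt (thicken_walls_alt grid) r c =
      if pvNear grid grid.length (grid.headD []).length r c = true then 100 else pvAt grid r c := by
  have h0 : grid.length ≠ 0 := by omega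
  rw [pvB_eq_scan grid h0, pvAt_scanB grid (pvWide_of_pre hpre) hr hc _ ?bd grid (pvShape_refl grid)]
  case bd =>
    intro p hp
    simp only [List.mem_flatMap, List.mem_map, PySem.List.mem_pyRange_one] at hp
    obtain ⟨r2, hr2, c2, hc2, rfl⟩ := hp
    exact ⟨hr2.1, hc2.1⟩
  have hiff : (∃ p ∈ (PySem.List.pyRange 0 (grid.length : Int) 1).flatMap
        (fun r2 => (PySem.List.pyRange 0 ((grid.headD []).length : Int) 1).map (fun c2 => (r2, c2))),
      p.1 = (r : Int) ∧ p.2 = (c : Int) ∧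
        pvWin grid (grid.length : Int) ((grid.headD []).length : Int) p.1 p.2 = true) ↔
      pvNear grid grid.length (grid.headD []).length r c = true := by
    constructor
    · rintro ⟨p, hp, h1, h2, h3⟩
      rw [h1, h2] at h3
      exact (pvWin_iff_near grid hr hc).mp h3
    · intro hn
      refine ⟨((r : Int), (c : Int)), ?_, rfl, rfl, (pvWin_iff_near grid hr hc).mpr hn⟩
      simp only [List.mem_flatMap, List.mem_map, PySem.List.mem_pyRange_one]
      exact ⟨(r : Int), ⟨by omega, by exact_mod_cast hr⟩, (c : Int), ⟨by omega, by exact_mod_cast hc⟩, rfl⟩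
  rw [if_congr hiff rfl rfl]

theorem pvB_tail (grid : List (List Int)) (_hpre : Pre_thicken_walls grid)
    {r c : Nat} (hr : r < grid.length) (hc : (grid.headD []).length ≤ c) :
    pvAt (thicken_walls_alt grid) r c = pvAt grid r c := by
  have h0 : grid.length ≠ 0 := by omega
  rw [pvB_eq_scan grid h0, pvAt_scanB_tail grid hr hc _ ?bd grid (pvShape_refl grid)]
  case bd =>
    intro p hp
    simp only [List.mem_flatMap, List.mem_map, PySem.List.mem_pyRange_one] at hp
    obtain ⟨r2, hr2, c2, hc2, rfl⟩ := hp
    exact ⟨hc2.1, hc2.2⟩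

-- ===== VERDICT (by name: the statement is the Claim_ definition above) =====
theorem thicken_walls_spec : Claim_equal_thicken_walls := by
  intro grid _ hpre
  unfold Spec_thicken_walls
  by_cases h0 : grid.length = 0
  · rw [List.length_eq_zero_iff] at h0
    subst h0
    rfl
  · obtain ⟨hAL, hArow⟩ := pvA_shape grid hpre
    obtain ⟨hBL, hBrow⟩ := pvB_shape grid hpre
    apply List.ext_getElem (by omega)
    intro r hr1 hr2
    have hr : r < grid.length := by omega
    have hAlen : (thicken_walls grid)[r].length = (grid.getD r []).length := by
      rw [← List.getD_eq_getElem _ [] hr1]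
      exact hArow r hr
    have hBlen : (thicken_walls_alt grid)[r].length = (grid.getD r []).length := by
      rw [← List.getD_eq_getElem _ [] hr2]
      exact hBrow r hr
    apply List.ext_getElem (by omega)
    intro c hc1 hc2
    have eA : pvAt (thicken_walls grid) r c = (thicken_walls grid)[r][c] := by
      unfold pvAt
      rw [List.getD_eq_getElem _ _ hr1, List.getD_eq_getElem _ _ hc1]
    have eB : pvAt (thicken_walls_alt grid) r c = (thicken_walls_alt grid)[r][c] := by
      unfold pvAt
      rw [List.getD_eq_getElem _ _ hr2, List.getD_eq_getElem _ _ hc2]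
    rw [← eA, ← eB]
    by_cases hc : c < (grid.headD []).length
    · rw [pvA_char grid hpre hr hc, pvB_char grid hpre hr hc]
    · rw [pvA_tail grid hpre hr (by omega), pvB_tail grid hpre hr (by omega)]
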